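-- pv_equiv track=rewrite | github.com/gurunawab/DSA-Practice | DSA/DSA2.py | countSquare
-- ===== SOURCE A (Python) =====
-- def countSquare(mat, x):
--     n = len(mat)
--     m = len(mat[0])
--
--     pref = [[0] * (m + 1) for _ in range(n + 1)]
--
--     for i in range(1, n + 1):
--         for j in range(1, m + 1):
--             pref[i][j] = (mat[i-1][j-1] + pref[i-1][j] + pref[i][j-1] - pref[i-1][j-1])
--
--     count = 0
--
--     max_k = min(n, m)
--     for k in range(1, max_k + 1):
--         for i in range(k, n + 1):
--             for j in range(k, m + 1):
--                 current_sum = (pref[i][j] - pref[i-k][j] - pref[i][j-k] + pref[i-k][j-k])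
--
--                 if current_sum == x:
--                     count += 1
--
--     return count
-- ===== SOURCE B (Python) =====
-- def countSquare(mat, x):
--     n = len(mat)
--     m = len(mat[0])
--     count = 0
--     for k in range(1, min(n, m) + 1):
--         for i in range(n - k + 1):
--             for j in range(m - k + 1):
--                 s = 0
--                 for di in range(k):
--                     for dj in range(k):
--                         s += mat[i + di][j + dj]
--                 if s == x:
--                     count += 1
--     return count
-- ===== Notes on version B (the rewrite author's own statement) =====
-- stated objective: simpler
-- what changed: B drops A's (n+1)x(m+1) prefix-sum table entirely and counts squares by summing each k-by-k square's cells directly with nested loops over its cells; Pre_ excludes only the inputs (empty matrix, or a later row shorter than row 0) on which A raises IndexError.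
import Mathlib
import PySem

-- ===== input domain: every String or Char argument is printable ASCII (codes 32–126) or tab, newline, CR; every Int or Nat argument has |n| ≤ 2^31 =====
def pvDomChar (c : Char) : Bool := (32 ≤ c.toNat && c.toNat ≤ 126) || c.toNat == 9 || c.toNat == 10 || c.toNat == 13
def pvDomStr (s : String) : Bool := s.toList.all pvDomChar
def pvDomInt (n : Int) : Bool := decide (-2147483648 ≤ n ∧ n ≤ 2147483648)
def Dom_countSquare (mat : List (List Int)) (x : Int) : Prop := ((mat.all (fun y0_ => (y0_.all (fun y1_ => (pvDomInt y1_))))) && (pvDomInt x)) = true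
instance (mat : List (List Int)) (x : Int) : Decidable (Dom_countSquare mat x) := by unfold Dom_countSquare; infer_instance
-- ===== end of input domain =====

-- B drops A's prefix-sum table and sums each k×k square's cells directly (simpler, same results); equal on Pre_ = inputs where A does not raise.

-- shared lookup helpers: Python's p[i] / p[i][j] with a default (exact under Pre_: all indices used are in range there)
def pvRow (p : List (List Int)) (i : Int) : List Int := PySem.List.pyGetD p i []
def pvAt (p : List (List Int)) (i j : Int) : Int := PySem.List.pyGetD (pvRow p i) j 0

-- ===== PORT A =====
def countSquare (mat : List (List Int)) (x : Int) : Int :=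
  let n : Int := PySem.List.len mat
  let m : Int := PySem.List.len (PySem.List.pyGetD mat 0 [])
  let pref0 : List (List Int) := List.replicate (n.toNat + 1) (List.replicate (m.toNat + 1) (0 : Int))
  let pref := (PySem.List.pyRange 1 (n + 1) 1).foldl (fun pref i =>
      (PySem.List.pyRange 1 (m + 1) 1).foldl (fun pref j =>
        let v := pvAt mat (i-1) (j-1) + pvAt pref (i-1) j + pvAt pref i (j-1) - pvAt pref (i-1) (j-1)
        PySem.List.pySetD pref i (PySem.List.pySetD (pvRow pref i) j v)) pref) pref0
  let maxk := min n m
  (PySem.List.pyRange 1 (maxk + 1) 1).foldl (fun count k =>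
    (PySem.List.pyRange k (n + 1) 1).foldl (fun count i =>
      (PySem.List.pyRange k (m + 1) 1).foldl (fun count j =>
        if pvAt pref i j - pvAt pref (i-k) j - pvAt pref i (j-k) + pvAt pref (i-k) (j-k) = x
        then count + 1 else count) count) count) 0

-- ===== PORT B =====
def countSquare_alt (mat : List (List Int)) (x : Int) : Int :=
  let n : Int := PySem.List.len mat
  let m : Int := PySem.List.len (PySem.List.pyGetD mat 0 [])
  (PySem.List.pyRange 1 (min n m + 1) 1).foldl (fun count k =>
    (PySem.List.pyRange 0 (n - k + 1) 1).foldl (fun count i =>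
      (PySem.List.pyRange 0 (m - k + 1) 1).foldl (fun count j =>
        let s := (PySem.List.pyRange 0 k 1).foldl (fun s di =>
          (PySem.List.pyRange 0 k 1).foldl (fun s dj =>
            s + pvAt mat (i + di) (j + dj)) s) 0
        if s = x then count + 1 else count) count) count) 0

-- ===== PRECONDITION & SPEC =====
-- Pre_ excludes exactly the inputs where Python A raises IndexError: the empty matrix (mat[0]) and
-- matrices where some row is shorter than row 0 (mat[i-1][j-1] out of range).
def Pre_countSquare (mat : List (List Int)) (x : Int) : Prop :=
  mat ≠ [] ∧ ∀ row ∈ mat, (mat.headD []).length ≤ row.length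
instance (mat : List (List Int)) (x : Int) : Decidable (Pre_countSquare mat x) := by unfold Pre_countSquare; infer_instance
def pvWitness_countSquare : List (List Int) × Int := ([[1, 2], [3, 4]], 3)

def Spec_countSquare (mat : List (List Int)) (x : Int) (out : Int) : Prop := out = countSquare_alt mat x
instance (mat : List (List Int)) (x : Int) (out : Int) : Decidable (Spec_countSquare mat x out) := by unfold Spec_countSquare; infer_instance

-- ===== CLAIM (what is proved, stated in full; the proofs are below) =====
def Claim_equal_countSquare : Prop := ∀ (mat : List (List Int)) (x : Int), Dom_countSquare mat x → Pre_countSquare mat x → Spec_countSquare mat x (countSquare mat x)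

-- ===== LEMMAS AND PROOFS =====

-- cell (r,c) of the matrix, 0 outside (the ports' pyGetD defaults coincide with this on the indices used)
def aCell (mat : List (List Int)) (r c : Nat) : Int := (mat.getD r []).getD c 0

-- the recurrence A's prefix table satisfies
def Pfun (mat : List (List Int)) : Nat → Nat → Int
  | 0, _ => 0
  | _+1, 0 => 0
  | i+1, j+1 => aCell mat i j + Pfun mat i (j+1) + Pfun mat (i+1) j - Pfun mat i j
  termination_by i j => (i, j)

def rowSum (mat : List (List Int)) (r j : Nat) : Int := ((List.range j).map (fun c => aCell mat r c)).sum
def Sfun (mat : List (List Int)) (i j : Nat) : Int := ((List.range i).map (fun r => rowSum mat r j)).sum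

-- the table state after rows < i are final, row i final up to column j, rest still 0
def prefMid (mat : List (List Int)) (i j : Nat) : List (List Int) :=
  (List.range (mat.length + 1)).map (fun r =>
    (List.range ((mat.getD 0 []).length + 1)).map (fun c =>
      if r < i ∨ (r = i ∧ c ≤ j) then Pfun mat r c else 0))

theorem Pfun_zero_left (mat : List (List Int)) (c : Nat) : Pfun mat 0 c = 0 := by cases c <;> simp [Pfun]
theorem Pfun_zero_right (mat : List (List Int)) (r : Nat) : Pfun mat r 0 = 0 := by cases r <;> simp [Pfun]

-- basic sum gymnastics over list sums
theorem sum_map_sub {α : Type} (l : List α) (f g : α → Int) :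
    (l.map (fun y => f y - g y)).sum = (l.map f).sum - (l.map g).sum := by
  induction l with
  | nil => simp
  | cons a l ih => simp [ih]; ring

theorem sum_map_add {α : Type} (l : List α) (f g : α → Int) :
    (l.map (fun y => f y + g y)).sum = (l.map f).sum + (l.map g).sum := by
  induction l with
  | nil => simp
  | cons a l ih => simp [ih]; ring

theorem rowSum_succ (mat : List (List Int)) (r j : Nat) :
    rowSum mat r (j+1) = rowSum mat r j + aCell mat r j := by
  simp [rowSum, List.range_succ]

theorem rowSum_add (mat : List (List Int)) (r j k : Nat) :
    rowSum mat r (j+k) = rowSum mat r j + ((List.range k).map (fun e => aCell mat r (j+e))).sum := by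
  simp [rowSum, List.range_add]; rfl

theorem Sfun_succ_left (mat : List (List Int)) (i j : Nat) :
    Sfun mat (i+1) j = Sfun mat i j + rowSum mat i j := by
  simp [Sfun, List.range_succ]

theorem Sfun_add (mat : List (List Int)) (i k j : Nat) :
    Sfun mat (i+k) j = Sfun mat i j + ((List.range k).map (fun d => rowSum mat (i+d) j)).sum := by
  simp [Sfun, List.range_add]; rfl

theorem Sfun_col (mat : List (List Int)) (i j : Nat) :
    Sfun mat i (j+1) = Sfun mat i j + ((List.range i).map (fun r => aCell mat r j)).sum := by
  unfold Sfun
  rw [← sum_map_add]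
  exact congrArg _ (List.map_congr_left (fun r _ => rowSum_succ mat r j))

theorem Pfun_eq (mat : List (List Int)) : ∀ i j, Pfun mat i j = Sfun mat i j := by
  intro i
  induction i with
  | zero => intro j; simp [Pfun_zero_left, Sfun]
  | succ i ihi =>
    intro j
    induction j with
    | zero => simp [Pfun_zero_right, Sfun, rowSum]
    | succ j ihj =>
      rw [show Pfun mat (i+1) (j+1) = aCell mat i j + Pfun mat i (j+1) + Pfun mat (i+1) j - Pfun mat i j from by simp [Pfun]]
      rw [ihi, ihi, ihj, Sfun_col, Sfun_succ_left, Sfun_succ_left, Sfun_col, rowSum_succ]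
      ring

-- the k×k square at top-left (t,u) via the prefix function
theorem square_sum (mat : List (List Int)) (t u k : Nat) :
    Pfun mat (t+k) (u+k) - Pfun mat t (u+k) - Pfun mat (t+k) u + Pfun mat t u
      = ((List.range k).map (fun d => ((List.range k).map (fun e => aCell mat (t+d) (u+e))).sum)).sum := by
  rw [Pfun_eq, Pfun_eq, Pfun_eq, Pfun_eq, Sfun_add, Sfun_add]
  have h : ∀ d : Nat, rowSum mat (t+d) (u+k) - rowSum mat (t+d) u
      = ((List.range k).map (fun e => aCell mat (t+d) (u+e))).sum := by
    intro d; rw [rowSum_add]; ring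
  have := sum_map_sub (List.range k) (fun d => rowSum mat (t+d) (u+k)) (fun d => rowSum mat (t+d) u)
  have h2 : ((List.range k).map (fun d => rowSum mat (t+d) (u+k) - rowSum mat (t+d) u)).sum
      = ((List.range k).map (fun d => ((List.range k).map (fun e => aCell mat (t+d) (u+e))).sum)).sum :=
    congrArg _ (List.map_congr_left (fun d _ => h d))
  rw [← h2, this]; ring

-- map-of-range tables: lookup and update
theorem getD_map_range {α : Type} (f : Nat → α) (N t : Nat) (d : α) (ht : t < N) :
    ((List.range N).map f).getD t d = f t := by
  rw [List.getD_eq_getElem?_getD]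
  simp [ht]

theorem set_map_range {α : Type} (f : Nat → α) (N t : Nat) (v : α) (ht : t < N) :
    ((List.range N).map f).set t v = (List.range N).map (fun r => if r = t then v else f r) := by
  apply List.ext_getElem
  · simp
  · intro i h1 h2
    simp only [List.getElem_set, List.getElem_map, List.getElem_range]
    by_cases hit : t = i
    · subst hit; simp
    · rw [if_neg hit, if_neg (Ne.symm hit)]

theorem pvAt_natCast (p : List (List Int)) (r c : Nat) :
    pvAt p (↑r) (↑c) = (p.getD r []).getD c 0 := by
  simp [pvAt, pvRow]

theorem pvRow_prefMid (mat : List (List Int)) (i j r : Nat) (hr : r < mat.length + 1) :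
    pvRow (prefMid mat i j) (↑r)
      = (List.range ((mat.getD 0 []).length + 1)).map (fun c =>
          if r < i ∨ (r = i ∧ c ≤ j) then Pfun mat r c else 0) := by
  simp only [pvRow, prefMid, PySem.List.pyGetD_natCast]
  exact getD_map_range _ _ _ _ hr

theorem pvAt_prefMid (mat : List (List Int)) (i j r c : Nat)
    (hr : r < mat.length + 1) (hc : c < (mat.getD 0 []).length + 1) :
    pvAt (prefMid mat i j) (↑r) (↑c)
      = if r < i ∨ (r = i ∧ c ≤ j) then Pfun mat r c else 0 := by
  simp only [pvAt, pvRow_prefMid mat i j r hr, PySem.List.pyGetD_natCast]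
  exact getD_map_range _ _ _ _ hc

-- one inner-loop step writes the next prefix value
theorem inner_step (mat : List (List Int)) (i j0 : Nat)
    (h1 : 1 ≤ i) (hi : i ≤ mat.length) (hj : j0 < (mat.getD 0 []).length) :
    PySem.List.pySetD (prefMid mat i j0) (↑i)
      (PySem.List.pySetD (pvRow (prefMid mat i j0) (↑i)) (↑j0 + 1)
        (pvAt mat (↑i - 1) (↑j0 + 1 - 1)
          + pvAt (prefMid mat i j0) (↑i - 1) (↑j0 + 1)
          + pvAt (prefMid mat i j0) (↑i) (↑j0 + 1 - 1)
          - pvAt (prefMid mat i j0) (↑i - 1) (↑j0 + 1 - 1)))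
      = prefMid mat i (j0 + 1) := by
  have e1 : (↑i - 1 : Int) = ↑(i - 1) := by omega
  have e2 : (↑j0 + 1 - 1 : Int) = ↑j0 := by omega
  have e3 : (↑j0 + 1 : Int) = ↑(j0 + 1) := by omega
  rw [e1, e2, e3]
  rw [pvAt_natCast, pvAt_prefMid mat i j0 (i-1) (j0+1) (by omega) (by omega),
      pvAt_prefMid mat i j0 i j0 (by omega) (by omega),
      pvAt_prefMid mat i j0 (i-1) j0 (by omega) (by omega)]
  rw [if_pos (Or.inl (by omega)), if_pos (Or.inr ⟨rfl, le_refl _⟩), if_pos (Or.inl (by omega))]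
  have hv : (mat.getD (i-1) []).getD j0 0 + Pfun mat (i-1) (j0+1) + Pfun mat i j0 - Pfun mat (i-1) j0
      = Pfun mat i (j0+1) := by
    obtain ⟨i', rfl⟩ : ∃ i', i = i' + 1 := ⟨i - 1, by omega⟩
    simp [Pfun, aCell]
  rw [pvRow_prefMid mat i j0 i (by omega)]
  simp only [PySem.List.pySetD_natCast]
  rw [set_map_range _ _ _ _ (by omega)]
  unfold prefMid
  rw [set_map_range _ _ _ _ (by omega)]
  apply List.map_congr_left
  intro r hr
  simp only [List.mem_range] at hr
  by_cases hri : r = i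
  · subst hri
    rw [if_pos rfl]
    apply List.map_congr_left
    intro c hc
    simp only [List.mem_range] at hc
    by_cases hcj : c = j0 + 1
    · subst hcj
      rw [if_pos rfl, if_pos (Or.inr ⟨rfl, le_refl _⟩), hv]
    · rw [if_neg hcj]
      simp only [lt_irrefl, false_or, true_and, and_true, eq_self_iff_true]
      split_ifs with hA hB hB <;> first | rfl | omega
  · rw [if_neg hri]
    apply List.map_congr_left
    intro c hc
    split_ifs with hA hB hB <;> first | rfl | omega

-- finishing row i leaves the state ready for row i+1
theorem prefMid_row_full (mat : List (List Int)) (i : Nat) :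
    prefMid mat i ((mat.getD 0 []).length) = prefMid mat (i+1) 0 := by
  unfold prefMid
  apply List.map_congr_left
  intro r hr
  apply List.map_congr_left
  intro c hc
  simp only [List.mem_range] at hr hc
  split_ifs with hA hB hB
  · rfl
  · omega
  · rcases hB with h | ⟨h1, h2⟩
    · omega
    · subst h1
      have : c = 0 := by omega
      subst this
      exact (Pfun_zero_right mat (i+1)).symm
  · rfl

-- the initial all-zero table is the state before row 1
theorem pref0_eq (mat : List (List Int)) :
    List.replicate (mat.length + 1) (List.replicate ((mat.getD 0 []).length + 1) (0 : Int))
      = prefMid mat 0 ((mat.getD 0 []).length) := by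
  apply List.ext_getElem
  · simp [prefMid]
  · intro r h1 h2
    simp only [prefMid, List.getElem_map, List.getElem_range, List.getElem_replicate]
    apply List.ext_getElem
    · simp
    · intro c g1 g2
      simp only [List.getElem_map, List.getElem_range, List.getElem_replicate]
      split_ifs with h
      · rcases h with h | ⟨h0, _⟩
        · omega
        · subst h0
          exact (Pfun_zero_left mat _).symm
      · rfl

theorem inner_fold (mat : List (List Int)) (i : Nat) (h1 : 1 ≤ i) (hi : i ≤ mat.length) :
    ∀ t j0 : Nat, j0 + t = (mat.getD 0 []).length →
    (PySem.List.pyRange (↑j0 + 1) (↑((mat.getD 0 []).length) + 1) 1).foldl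
      (fun pref j => PySem.List.pySetD pref (↑i) (PySem.List.pySetD (pvRow pref (↑i)) j
        (pvAt mat (↑i - 1) (j - 1) + pvAt pref (↑i - 1) j + pvAt pref (↑i) (j - 1) - pvAt pref (↑i - 1) (j - 1))))
      (prefMid mat i j0)
    = prefMid mat i ((mat.getD 0 []).length) := by
  intro t
  induction t with
  | zero =>
    intro j0 hj
    rw [PySem.List.pyRange_one_eq_nil (by omega)]
    rw [show j0 = (mat.getD 0 []).length from by omega]
    rfl
  | succ t ih =>
    intro j0 hj
    rw [PySem.List.pyRange_one_cons (by omega), List.foldl_cons]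
    rw [inner_step mat i j0 h1 hi (by omega)]
    have e : ((j0 : Int) + 1 + 1) = (((j0 + 1 : Nat) : Int) + 1) := by push_cast; ring
    rw [e]
    exact ih (j0 + 1) (by omega)

theorem outer_fold (mat : List (List Int)) :
    ∀ t i0 : Nat, i0 + t = mat.length →
    (PySem.List.pyRange (↑i0 + 1) (↑mat.length + 1) 1).foldl
      (fun pref i => (PySem.List.pyRange 1 (↑((mat.getD 0 []).length) + 1) 1).foldl
        (fun pref j => PySem.List.pySetD pref i (PySem.List.pySetD (pvRow pref i) j
          (pvAt mat (i - 1) (j - 1) + pvAt pref (i - 1) j + pvAt pref i (j - 1) - pvAt pref (i - 1) (j - 1)))) pref)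
      (prefMid mat i0 ((mat.getD 0 []).length))
    = prefMid mat mat.length ((mat.getD 0 []).length) := by
  intro t
  induction t with
  | zero =>
    intro i0 h
    rw [show i0 = mat.length from by omega]
    rw [show PySem.List.pyRange (↑mat.length + 1) (↑mat.length + 1) 1 = [] from
      PySem.List.pyRange_one_eq_nil (le_refl _)]
    rfl
  | succ t ih =>
    intro i0 h
    rw [show PySem.List.pyRange (↑i0 + 1) (↑mat.length + 1) 1
        = (↑i0 + 1) :: PySem.List.pyRange (↑i0 + 1 + 1) (↑mat.length + 1) 1 from
      PySem.List.pyRange_one_cons (by omega), List.foldl_cons]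
    rw [prefMid_row_full]
    have e : ((i0 : Int) + 1) = ((i0 + 1 : Nat) : Int) := by push_cast; ring
    rw [e]
    have hin := inner_fold mat (i0 + 1) (by omega) (by omega) ((mat.getD 0 []).length) 0 (by omega)
    rw [show (((0 : Nat) : Int) + 1) = 1 from by norm_num] at hin
    rw [hin]
    exact ih (i0 + 1) (by omega)

theorem build_eq (mat : List (List Int)) :
    (PySem.List.pyRange 1 (↑mat.length + 1) 1).foldl
      (fun pref i => (PySem.List.pyRange 1 (↑((mat.getD 0 []).length) + 1) 1).foldl
        (fun pref j => PySem.List.pySetD pref i (PySem.List.pySetD (pvRow pref i) j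
          (pvAt mat (i - 1) (j - 1) + pvAt pref (i - 1) j + pvAt pref i (j - 1) - pvAt pref (i - 1) (j - 1)))) pref)
      (List.replicate (mat.length + 1) (List.replicate ((mat.getD 0 []).length + 1) (0 : Int)))
    = prefMid mat mat.length ((mat.getD 0 []).length) := by
  rw [pref0_eq]
  have h := outer_fold mat mat.length 0 (by omega)
  rw [show (((0 : Nat) : Int) + 1) = 1 from by norm_num] at h
  exact h

theorem pyRange_shift (a b : Int) :
    PySem.List.pyRange a b 1 = (PySem.List.pyRange 0 (b - a) 1).map (fun t => a + t) := by
  rw [PySem.List.pyRange_one, PySem.List.pyRange_one, List.map_map]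
  simp

theorem aCell_def (mat : List (List Int)) (r c : Nat) :
    (mat.getD r []).getD c 0 = aCell mat r c := rfl

theorem pvAt_final (mat : List (List Int)) (r c : Nat)
    (hr : r ≤ mat.length) (hc : c ≤ (mat.getD 0 []).length) :
    pvAt (prefMid mat mat.length ((mat.getD 0 []).length)) (↑r) (↑c) = Pfun mat r c := by
  rw [pvAt_prefMid _ _ _ _ _ (by omega) (by omega), if_pos (by omega)]

-- the counting loops: A's prefix-table queries equal B's direct square sums
theorem count_eq (mat : List (List Int)) (x : Int) :
    (PySem.List.pyRange 1 (min (↑mat.length) (↑((mat.getD 0 []).length)) + 1) 1).foldl (fun count k =>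
      (PySem.List.pyRange k (↑mat.length + 1) 1).foldl (fun count i =>
        (PySem.List.pyRange k (↑((mat.getD 0 []).length) + 1) 1).foldl (fun count j =>
          if pvAt (prefMid mat mat.length ((mat.getD 0 []).length)) i j
             - pvAt (prefMid mat mat.length ((mat.getD 0 []).length)) (i - k) j
             - pvAt (prefMid mat mat.length ((mat.getD 0 []).length)) i (j - k)
             + pvAt (prefMid mat mat.length ((mat.getD 0 []).length)) (i - k) (j - k) = x
          then count + 1 else count) count) count) 0
    = countSquare_alt mat x := by
  unfold countSquare_alt
  simp only [PySem.List.len_eq, PySem.List.pyGetD_zero]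
  apply PySem.List.foldl_congr_mem
  intro count k hk
  rw [PySem.List.mem_pyRange_one] at hk
  obtain ⟨k', rfl⟩ : ∃ k' : Nat, k = ↑k' := ⟨k.toNat, by omega⟩
  have hk1 : 1 ≤ k' := by exact_mod_cast hk.1
  have hkn : k' ≤ mat.length ∧ k' ≤ (mat.getD 0 []).length := by
    constructor <;> omega
  -- i level: shift A's range [k', n+1) to B's [0, n-k'+1)
  rw [pyRange_shift (↑k') (↑mat.length + 1),
      show (↑mat.length + 1 - ↑k' : Int) = ↑mat.length - ↑k' + 1 from by ring,
      List.foldl_map]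
  apply PySem.List.foldl_congr_mem
  intro count i hi
  rw [PySem.List.mem_pyRange_one] at hi
  obtain ⟨t, rfl⟩ : ∃ t : Nat, i = ↑t := ⟨i.toNat, by omega⟩
  -- j level
  rw [pyRange_shift (↑k') (↑((mat.getD 0 []).length) + 1),
      show (↑((mat.getD 0 []).length) + 1 - ↑k' : Int) = ↑((mat.getD 0 []).length) - ↑k' + 1 from by ring,
      List.foldl_map]
  apply PySem.List.foldl_congr_mem
  intro count j hj
  rw [PySem.List.mem_pyRange_one] at hj
  obtain ⟨u, rfl⟩ : ∃ u : Nat, j = ↑u := ⟨j.toNat, by omega⟩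
  -- innermost bodies
  have hA : pvAt (prefMid mat mat.length ((mat.getD 0 []).length)) (↑k' + ↑t) (↑k' + ↑u)
      - pvAt (prefMid mat mat.length ((mat.getD 0 []).length)) (↑k' + ↑t - ↑k') (↑k' + ↑u)
      - pvAt (prefMid mat mat.length ((mat.getD 0 []).length)) (↑k' + ↑t) (↑k' + ↑u - ↑k')
      + pvAt (prefMid mat mat.length ((mat.getD 0 []).length)) (↑k' + ↑t - ↑k') (↑k' + ↑u - ↑k')
      = Pfun mat (t + k') (u + k') - Pfun mat t (u + k') - Pfun mat (t + k') u + Pfun mat t u := by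
    rw [show (↑k' + ↑t : Int) = ((t + k' : Nat) : Int) from by push_cast; ring,
        show (↑k' + ↑u : Int) = ((u + k' : Nat) : Int) from by push_cast; ring,
        show (((t + k' : Nat) : Int) - ↑k') = ((t : Nat) : Int) from by push_cast; ring,
        show (((u + k' : Nat) : Int) - ↑k') = ((u : Nat) : Int) from by push_cast; ring]
    rw [pvAt_final mat (t+k') (u+k') (by omega) (by omega),
        pvAt_final mat t (u+k') (by omega) (by omega),
        pvAt_final mat (t+k') u (by omega) (by omega),
        pvAt_final mat t u (by omega) (by omega)]
  have hB : (PySem.List.pyRange 0 (↑k') 1).foldl (fun s di =>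
        (PySem.List.pyRange 0 (↑k') 1).foldl (fun s dj =>
          s + pvAt mat (↑t + di) (↑u + dj)) s) 0
      = Pfun mat (t + k') (u + k') - Pfun mat t (u + k') - Pfun mat (t + k') u + Pfun mat t u := by
    rw [square_sum mat t u k']
    rw [PySem.List.pyRange_one]
    simp only [sub_zero, Int.toNat_natCast, List.foldl_map, zero_add]
    simp only [PySem.List.foldl_add]
    simp only [← Nat.cast_add, pvAt_natCast, aCell_def, zero_add]
  rw [hA, hB]

theorem ports_eq (mat : List (List Int)) (x : Int) : countSquare mat x = countSquare_alt mat x := by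
  unfold countSquare
  simp only [PySem.List.len_eq, PySem.List.pyGetD_zero, Int.toNat_natCast]
  rw [build_eq]
  exact count_eq mat x





-- ===== VERDICT (by name: the statement is the Claim_ definition above) =====
theorem countSquare_spec : Claim_equal_countSquare := fun mat x _ _ => ports_eq mat x
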